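-- pv_equiv track=rewrite | github.com/MirrorDNA-Reflection-Protocol/chetana-browser | backend/engines/domain_intel.py | _check_tld
-- ===== SOURCE A (Python) =====
-- HIGH_RISK_TLDS = {
--     ".top", ".xyz", ".click", ".loan", ".buzz", ".gq", ".tk", ".ml",
--     ".cf", ".ga", ".work", ".fit", ".surf", ".rest", ".icu", ".cam",
--     ".monster", ".cfd", ".sbs", ".quest", ".cyou",
-- }
--
-- MEDIUM_RISK_TLDS = {
--     ".online", ".site", ".store", ".shop", ".info", ".biz", ".pw",
--     ".cc", ".ws", ".pro", ".mobi", ".life", ".world", ".today",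
-- }
--
-- def _check_tld(domain: str) -> str:
--     """Check TLD risk level."""
--     d = domain.lower()
--     for tld in HIGH_RISK_TLDS:
--         if d.endswith(tld):
--             return "high"
--     for tld in MEDIUM_RISK_TLDS:
--         if d.endswith(tld):
--             return "medium"
--     return "safe"
-- ===== SOURCE B (Python) =====
-- _TLD_RISK = {
--     "top": "high", "xyz": "high", "click": "high", "loan": "high",
--     "buzz": "high", "gq": "high", "tk": "high", "ml": "high",
--     "cf": "high", "ga": "high", "work": "high", "fit": "high",
--     "surf": "high", "rest": "high", "icu": "high", "cam": "high",
--     "monster": "high", "cfd": "high", "sbs": "high", "quest": "high",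
--     "cyou": "high",
--     "online": "medium", "site": "medium", "store": "medium", "shop": "medium",
--     "info": "medium", "biz": "medium", "pw": "medium", "cc": "medium",
--     "ws": "medium", "pro": "medium", "mobi": "medium", "life": "medium",
--     "world": "medium", "today": "medium",
-- }
--
-- def _check_tld(domain: str) -> str:
--     """Check TLD risk level."""
--     d = domain.lower()
--     i = d.rfind(".")
--     if i == -1:
--         return "safe"
--     return _TLD_RISK.get(d[i + 1:], "safe")
-- ===== Notes on version B (the rewrite author's own statement) =====
-- stated objective: simpler
-- what changed: Instead of scanning all 35 risky TLDs with endswith in two loops, B extracts the dotless final label once via rfind and classifies it with a single combined label-to-risk dict lookup with default 'safe'.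
import Mathlib
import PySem

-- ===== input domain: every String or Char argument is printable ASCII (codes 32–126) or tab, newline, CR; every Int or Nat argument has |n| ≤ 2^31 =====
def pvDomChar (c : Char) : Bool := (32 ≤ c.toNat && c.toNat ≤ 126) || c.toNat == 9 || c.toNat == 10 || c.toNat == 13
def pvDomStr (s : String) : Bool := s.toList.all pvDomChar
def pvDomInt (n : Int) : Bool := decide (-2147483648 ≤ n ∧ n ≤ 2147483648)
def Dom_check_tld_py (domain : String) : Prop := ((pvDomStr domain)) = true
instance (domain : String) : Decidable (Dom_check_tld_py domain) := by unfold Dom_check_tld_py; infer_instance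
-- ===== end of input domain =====

-- B extracts the dotless final label once (rfind + slice) and classifies it with one
-- combined label→risk dict lookup (default "safe") instead of scanning all 35 risky
-- TLDs with endswith in two loops; same return value everywhere.

-- ===== PORT A =====
def pvHighA : List String := [".top", ".xyz", ".click", ".loan", ".buzz", ".gq", ".tk", ".ml",
  ".cf", ".ga", ".work", ".fit", ".surf", ".rest", ".icu", ".cam",
  ".monster", ".cfd", ".sbs", ".quest", ".cyou"]

def pvMediumA : List String := [".online", ".site", ".store", ".shop", ".info", ".biz", ".pw",
  ".cc", ".ws", ".pro", ".mobi", ".life", ".world", ".today"]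

-- Python iterates over a set; the result does not depend on iteration order, so the source order is used.
def check_tld_py (domain : String) : String :=
  let d := PySem.Str.lower domain
  if pvHighA.any (fun tld => PySem.Str.endswith d tld) then "high"
  else if pvMediumA.any (fun tld => PySem.Str.endswith d tld) then "medium"
  else "safe"

-- ===== PORT B =====
def pvRisk : PySem.Dict String String := PySem.Dict.mk
  [("top", "high"), ("xyz", "high"), ("click", "high"), ("loan", "high"),
   ("buzz", "high"), ("gq", "high"), ("tk", "high"), ("ml", "high"),
   ("cf", "high"), ("ga", "high"), ("work", "high"), ("fit", "high"),
   ("surf", "high"), ("rest", "high"), ("icu", "high"), ("cam", "high"),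
   ("monster", "high"), ("cfd", "high"), ("sbs", "high"), ("quest", "high"),
   ("cyou", "high"),
   ("online", "medium"), ("site", "medium"), ("store", "medium"), ("shop", "medium"),
   ("info", "medium"), ("biz", "medium"), ("pw", "medium"), ("cc", "medium"),
   ("ws", "medium"), ("pro", "medium"), ("mobi", "medium"), ("life", "medium"),
   ("world", "medium"), ("today", "medium")]

def check_tld_py_alt (domain : String) : String :=
  let d := PySem.Str.lower domain
  let i := PySem.Str.rfind d "."
  if i = -1 then "safe"
  else PySem.Dict.getD pvRisk (PySem.Str.slice d (some (i + 1)) none) "safe"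

-- ===== PRECONDITION & SPEC =====
def Spec_check_tld_py (domain : String) (out : String) : Prop := out = check_tld_py_alt domain
instance (domain : String) (out : String) : Decidable (Spec_check_tld_py domain out) := by unfold Spec_check_tld_py; infer_instance

-- ===== CLAIM (what is proved, stated in full; the proofs are below) =====
def Claim_equal_check_tld_py : Prop := ∀ (domain : String), Dom_check_tld_py domain → Spec_check_tld_py domain (check_tld_py domain)

-- ===== LEMMAS AND PROOFS =====

-- A's TLD lists are the dot-prefixed images of the dotless key lists of B's dict.
def pvHighKeys : List String := ["top", "xyz", "click", "loan", "buzz", "gq", "tk", "ml",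
  "cf", "ga", "work", "fit", "surf", "rest", "icu", "cam",
  "monster", "cfd", "sbs", "quest", "cyou"]

def pvMediumKeys : List String := ["online", "site", "store", "shop", "info", "biz", "pw",
  "cc", "ws", "pro", "mobi", "life", "world", "today"]

lemma pv_highA_eq : pvHighA = pvHighKeys.map (fun t => "." ++ t) := by decide
lemma pv_mediumA_eq : pvMediumA = pvMediumKeys.map (fun t => "." ++ t) := by decide
lemma pv_risk_eq : pvRisk = PySem.Dict.mk
    (pvHighKeys.map (fun t => (t, "high")) ++ pvMediumKeys.map (fun t => (t, "medium"))) := by decide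

-- rfind.go s sub j is -1 (no occurrence at any i ≤ j) or the HIGHEST i ≤ j with sub a prefix of s.drop i.
lemma pv_go_spec (s sub : List Char) (j : Nat) :
    (PySem.Chars.rfind.go s sub j = -1 ∧ ∀ i ≤ j, ¬ sub <+: s.drop i) ∨
    (∃ k : Nat, PySem.Chars.rfind.go s sub j = (k : Int) ∧ k ≤ j ∧ sub <+: s.drop k ∧
      ∀ i, k < i → i ≤ j → ¬ sub <+: s.drop i) := by
  induction j with
  | zero =>
    by_cases h : sub <+: s
    · right
      refine ⟨0, ?_, le_refl _, by simpa using h, fun i h1 h2 => by omega⟩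
      rw [PySem.Chars.rfind.go]
      simp [List.isPrefixOf_iff_prefix, h]
    · left
      constructor
      · rw [PySem.Chars.rfind.go]; simp [List.isPrefixOf_iff_prefix, h]
      · intro i hi
        interval_cases i
        simpa using h
  | succ j ih =>
    by_cases h : sub <+: s.drop (j + 1)
    · right
      refine ⟨j + 1, ?_, le_refl _, h, fun i h1 h2 => by omega⟩
      rw [PySem.Chars.rfind.go]
      simp [List.isPrefixOf_iff_prefix, h]
    · have hgo : PySem.Chars.rfind.go s sub (j + 1) = PySem.Chars.rfind.go s sub j := by
        rw [PySem.Chars.rfind.go]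
        simp [List.isPrefixOf_iff_prefix, h]
      rcases ih with ⟨h1, h2⟩ | ⟨k, hk, hkle, hp, hmax⟩
      · left
        refine ⟨hgo ▸ h1, fun i hi => ?_⟩
        rcases Nat.lt_or_ge i (j + 1) with hlt | hge
        · exact h2 i (by omega)
        · have : i = j + 1 := by omega
          subst this; exact h
      · right
        refine ⟨k, hgo ▸ hk, by omega, hp, fun i h1 h2 => ?_⟩
        rcases Nat.lt_or_ge i (j + 1) with hlt | hge
        · exact hmax i h1 (by omega)
        · have : i = j + 1 := by omega
          subst this; exact h

-- If no position of dl starts with '.', no string beginning with '.' is a suffix of dl.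
lemma pv_no_suffix (dl : List Char) (h : ∀ i ≤ dl.length, ¬ ['.'] <+: dl.drop i)
    (t : List Char) (ht : t.head? = some '.') : ¬ t <:+ dl := by
  rintro ⟨u, rfl⟩
  have hdrop : (u ++ t).drop u.length = t := by simp
  have hcon := h u.length (by simp)
  rw [hdrop] at hcon
  cases t with
  | nil => simp at ht
  | cons a r =>
    simp at ht
    subst ht
    exact hcon ⟨r, rfl⟩

-- With k the highest dot position, a dot-headed, dot-free-tail t is a suffix of dl iff it IS dl.drop k.
lemma pv_endswith_iff (dl : List Char) (k : Nat)
    (hp : ['.'] <+: dl.drop k)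
    (hmax : ∀ i, k < i → i ≤ dl.length → ¬ ['.'] <+: dl.drop i)
    (t : List Char) (ht : t.head? = some '.') (hr : '.' ∉ t.tail) :
    t <:+ dl ↔ dl.drop k = t := by
  constructor
  · rintro ⟨u, rfl⟩
    have hdrop : (u ++ t).drop u.length = t := by simp
    have hnotgt : ¬ k < u.length := by
      intro hlt
      refine hmax u.length hlt (by simp) ?_
      rw [hdrop]
      cases t with
      | nil => simp at ht
      | cons a r => simp at ht; subst ht; exact ⟨r, rfl⟩
    have hnotlt : ¬ u.length < k := by
      intro hlt
      have hget : ((u ++ t).drop k).head? = (u ++ t)[k]? := List.head?_drop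
      have hdot : (u ++ t)[k]? = some '.' := by
        rcases hp with ⟨w, hw⟩
        rw [← hget, ← hw]; simp
      cases t with
      | nil => simp at ht
      | cons a r =>
        simp at ht; subst ht
        rw [List.getElem?_append_right (by omega)] at hdot
        have : ('.' :: r)[k - u.length]? = r[k - u.length - 1]? := by
          rcases Nat.exists_eq_add_of_lt hlt with ⟨m, hm⟩
          have : k - u.length = m + 1 := by omega
          rw [this]; simp
        rw [this] at hdot
        exact hr (by simpa using List.mem_of_getElem? hdot)
    have : u.length = k := by omega
    rw [← this, hdrop]
  · intro hEq
    rw [← hEq]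
    exact List.drop_suffix k dl

-- Shape of A's TLD constants: every entry starts with '.' and its tail is dot-free.
lemma pv_shapeA : ∀ t ∈ pvHighA ++ pvMediumA, t.toList.head? = some '.' ∧ '.' ∉ t.toList.tail := by
  decide

-- A's loop over a TLD list equals false when dl has no dot-headed suffix position.
lemma pv_any_false (d : String) (L : List String)
    (hL : ∀ t ∈ L, t.toList.head? = some '.' ∧ '.' ∉ t.toList.tail)
    (h : ∀ i ≤ d.toList.length, ¬ ['.'] <+: d.toList.drop i) :
    L.any (fun tld => PySem.Str.endswith d tld) = false := by
  rw [List.any_eq_false]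
  intro t htL
  rw [PySem.Str.endswith_eq]
  intro hc
  exact pv_no_suffix d.toList h t.toList (hL t htL).1 ((PySem.Chars.endswith_iff _ _).mp hc)

-- A's loop over a TLD list equals membership of the final dotted label in that list.
lemma pv_any_eq_contains (d : String) (k : Nat) (suf : String)
    (hsuf : suf.toList = d.toList.drop k)
    (hp : ['.'] <+: d.toList.drop k)
    (hmax : ∀ i, k < i → i ≤ d.toList.length → ¬ ['.'] <+: d.toList.drop i)
    (L : List String)
    (hL : ∀ t ∈ L, t.toList.head? = some '.' ∧ '.' ∉ t.toList.tail) :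
    L.any (fun tld => PySem.Str.endswith d tld) = L.contains suf := by
  rcases Bool.eq_false_or_eq_true (L.contains suf) with hc | hc
  · rw [hc, List.any_eq_true]
    have hmem := List.contains_iff_mem.mp hc
    refine ⟨suf, hmem, ?_⟩
    rw [PySem.Str.endswith_eq]
    exact (PySem.Chars.endswith_iff _ _).mpr
      ((pv_endswith_iff d.toList k hp hmax suf.toList (hL suf hmem).1 (hL suf hmem).2).mpr hsuf.symm)
  · rw [hc, List.any_eq_false]
    intro t htL
    rw [PySem.Str.endswith_eq]
    intro hend
    have := (pv_endswith_iff d.toList k hp hmax t.toList (hL t htL).1 (hL t htL).2).mp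
      ((PySem.Chars.endswith_iff _ _).mp hend)
    have hst : suf = t := String.toList_inj.mp (by rw [hsuf, this])
    rw [Bool.eq_false_iff] at hc
    exact hc (List.contains_iff_mem.mpr (hst ▸ htL))

-- Membership of the dotted label in a dot-prefixed list is membership of the dotless key.
lemma pv_contains_dot_map (L : List String) (suf key : String)
    (h : suf.toList = '.' :: key.toList) :
    (L.map (fun t => "." ++ t)).contains suf = L.contains key := by
  induction L with
  | nil => simp
  | cons t r ih =>
    have hiff : (suf = "." ++ t) ↔ (key = t) := by
      rw [← String.toList_inj, ← String.toList_inj, h]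
      simp
    simp only [List.map_cons, List.contains_cons, ih]
    congr 1
    simp [hiff]

-- One combined getD lookup is A's pair of membership tests on the dotless keys.
lemma pv_getD_med (Lm : List String) (s : String) :
    PySem.Dict.getD (PySem.Dict.mk (Lm.map (fun t => (t, "medium")))) s "safe" =
      if Lm.contains s then "medium" else "safe" := by
  induction Lm with
  | nil =>
    simp [PySem.Dict.getD_eq_get?_getD,
      show PySem.Dict.mk ([] : List (String × String)) = PySem.Dict.empty from rfl]
  | cons t r ih =>
    simp only [List.map_cons, PySem.Dict.getD_eq_get?_getD, PySem.Dict.get?_mk_cons,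
      List.contains_cons] at *
    by_cases h : t = s
    · simp [h]
    · simp [show (t == s) = false by simp [h], show (s == t) = false by simp [Ne.symm h], ih]

lemma pv_getD_label (Lh Lm : List String) (s : String) :
    PySem.Dict.getD (PySem.Dict.mk (Lh.map (fun t => (t, "high")) ++ Lm.map (fun t => (t, "medium")))) s "safe" =
      if Lh.contains s then "high" else if Lm.contains s then "medium" else "safe" := by
  induction Lh with
  | nil => simpa using pv_getD_med Lm s
  | cons t r ih =>
    simp only [List.map_cons, List.cons_append, PySem.Dict.getD_eq_get?_getD,
      PySem.Dict.get?_mk_cons, List.contains_cons] at *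
    by_cases h : t = s
    · simp [h]
    · simp [show (t == s) = false by simp [h], show (s == t) = false by simp [Ne.symm h], ih]

-- ===== VERDICT (by name: the statement is the Claim_ definition above) =====
theorem check_tld_py_spec : Claim_equal_check_tld_py := by
  intro domain _
  unfold Spec_check_tld_py check_tld_py check_tld_py_alt
  simp only []
  set d := PySem.Str.lower domain with hd
  have hHsh : ∀ t ∈ pvHighA, t.toList.head? = some '.' ∧ '.' ∉ t.toList.tail :=
    fun t ht => pv_shapeA t (List.mem_append.mpr (Or.inl ht))
  have hMsh : ∀ t ∈ pvMediumA, t.toList.head? = some '.' ∧ '.' ∉ t.toList.tail :=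
    fun t ht => pv_shapeA t (List.mem_append.mpr (Or.inr ht))
  have hrw : PySem.Str.rfind d "." = PySem.Chars.rfind.go d.toList ['.'] d.toList.length := by
    rw [PySem.Str.rfind_eq]; rfl
  rcases pv_go_spec d.toList ['.'] d.toList.length with ⟨hneg, hnone⟩ | ⟨k, hk, hkle, hp, hmax⟩
  · rw [hrw, hneg]
    rw [pv_any_false d pvHighA hHsh hnone, pv_any_false d pvMediumA hMsh hnone]
    simp
  · rw [hrw, hk]
    rw [if_neg (show ¬((k : Int) = -1) by omega)]
    -- the dotted suffix and the dotless key
    have hkey : (PySem.Str.slice d (some ((k : Int) + 1)) none).toList = d.toList.drop (k + 1) := by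
      rw [PySem.Str.toList_slice, PySem.Chars.slice_eq_listSlice,
        show ((k : Int) + 1) = ((k + 1 : Nat) : Int) by push_cast; ring,
        PySem.List.slice_from_natCast]
    set key := PySem.Str.slice d (some ((k : Int) + 1)) none with hkeydef
    have hdropk : d.toList.drop k = '.' :: key.toList := by
      rcases hp with ⟨w, hw⟩
      rw [hkey, ← List.tail_drop, ← hw]
      simp
    have hsufA : (PySem.Str.slice d (some (k : Int)) none).toList = d.toList.drop k := by
      rw [PySem.Str.toList_slice, PySem.Chars.slice_eq_listSlice, PySem.List.slice_from_natCast]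
    set suf := PySem.Str.slice d (some (k : Int)) none with hsufdef
    have hsk : suf.toList = '.' :: key.toList := by rw [hsufA, hdropk]
    rw [pv_any_eq_contains d k suf hsufA hp hmax pvHighA hHsh,
      pv_any_eq_contains d k suf hsufA hp hmax pvMediumA hMsh,
      pv_highA_eq, pv_mediumA_eq,
      pv_contains_dot_map pvHighKeys suf key hsk,
      pv_contains_dot_map pvMediumKeys suf key hsk,
      pv_risk_eq, pv_getD_label]
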